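-- pv_equiv track=rewrite | github.com/ALowder123/AdventOfCode2023 | Week 1/Day 2 cubes/cubes2.py | count
-- ===== SOURCE A (Python) =====
-- def count(s):
--     r, g, b = 0, 0, 0
--     n = 0
--     for i in s:
--         if i.isdigit():
--             n += int(i)
--             n *= 10
--         elif i == "r":
--             r += n//10
--             n = 0
--         elif i == "g":
--             g += n//10
--             n = 0
--         elif i == "b":
--             b += n//10
--             n = 0
--     return r, g, b
-- ===== SOURCE B (Python) =====
-- def count(s):
--     # pass 1: tokenize into (chunk, color) pairs, splitting on the letters r/g/b
--     parts = []
--     cur = []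
--     for ch in s:
--         if ch in "rgb":
--             parts.append((cur, ch))
--             cur = []
--         else:
--             cur.append(ch)
--     # pass 2: per token, value = its digits read left to right (Horner); add to its color
--     r = g = b = 0
--     for chunk, c in parts:
--         v = 0
--         for d in chunk:
--             if d.isdigit():
--                 v = v * 10 + int(d)
--         if c == "r":
--             r += v
--         elif c == "g":
--             g += v
--         else:
--             b += v
--     return r, g, b
-- ===== Notes on version B (the rewrite author's own statement) =====
-- stated objective: alternative
-- what changed: Replaced A's single-pass char state machine (running n accumulated as digits*10 with n//10 flushed on r/g/b) by a two-pass tokenizer: first split the string on the letters r/g/b into (chunk, color) tokens, then sum each chunk's digit value (Horner) into its color.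
import Mathlib
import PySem

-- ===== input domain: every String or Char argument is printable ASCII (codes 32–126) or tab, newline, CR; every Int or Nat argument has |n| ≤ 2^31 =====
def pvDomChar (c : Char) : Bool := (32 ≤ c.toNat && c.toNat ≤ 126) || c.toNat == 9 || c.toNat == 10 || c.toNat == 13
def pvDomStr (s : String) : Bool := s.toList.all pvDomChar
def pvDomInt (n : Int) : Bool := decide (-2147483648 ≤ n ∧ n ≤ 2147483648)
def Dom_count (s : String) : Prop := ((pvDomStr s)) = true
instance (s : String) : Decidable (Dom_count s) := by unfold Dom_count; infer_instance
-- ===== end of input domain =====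

-- B replaces A's single-pass digit/color state machine by a two-pass tokenizer: split the string
-- on the letters r/g/b into (chunk, color) tokens, then sum each chunk's digit value per color
-- (alternative decomposition, same cost).


-- ===== PORT A =====
-- int(c) for a single character, exact for ASCII digits (the only chars it is applied to)
def pvDigitVal (c : Char) : Int := (PySem.Int.ofChars? [c]).getD 0

-- one char-by-char pass with state (r, g, b, n), as in A
def pvStepA (st : Int × Int × Int × Int) (i : Char) : Int × Int × Int × Int :=
  if PySem.Chars.isdigit i then (st.1, st.2.1, st.2.2.1, (st.2.2.2 + pvDigitVal i) * 10)
  else if i = 'r' then (st.1 + PySem.Int.floordiv st.2.2.2 10, st.2.1, st.2.2.1, 0)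
  else if i = 'g' then (st.1, st.2.1 + PySem.Int.floordiv st.2.2.2 10, st.2.2.1, 0)
  else if i = 'b' then (st.1, st.2.1, st.2.2.1 + PySem.Int.floordiv st.2.2.2 10, 0)
  else st

def count (s : String) : Int × Int × Int :=
  let st := s.toList.foldl pvStepA (0, 0, 0, 0)
  (st.1, st.2.1, st.2.2.1)

-- ===== PORT B =====
-- pass 1: split on the letters r/g/b into (chunk, color) tokens
def pvStepTok (st : List (List Char × Char) × List Char) (ch : Char) :
    List (List Char × Char) × List Char :=
  if ch = 'r' ∨ ch = 'g' ∨ ch = 'b' then (st.1 ++ [(st.2, ch)], []) else (st.1, st.2 ++ [ch])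

-- value of a chunk: its digits read left to right (Horner)
def pvChunkVal (chunk : List Char) : Int :=
  chunk.foldl (fun v d => if PySem.Chars.isdigit d then v * 10 + pvDigitVal d else v) 0

-- pass 2: add each token's value to its color
def pvStepSum (a : Int × Int × Int) (pc : List Char × Char) : Int × Int × Int :=
  let v := pvChunkVal pc.1
  if pc.2 = 'r' then (a.1 + v, a.2.1, a.2.2)
  else if pc.2 = 'g' then (a.1, a.2.1 + v, a.2.2)
  else (a.1, a.2.1, a.2.2 + v)

def count_alt (s : String) : Int × Int × Int :=
  let p := s.toList.foldl pvStepTok ([], [])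
  p.1.foldl pvStepSum (0, 0, 0)

-- ===== PRECONDITION & SPEC =====
def Spec_count (s : String) (out : Int × Int × Int) : Prop := out = count_alt s
instance (s : String) (out : Int × Int × Int) : Decidable (Spec_count s out) := by unfold Spec_count; infer_instance

-- ===== CLAIM (what is proved, stated in full; the proofs are below) =====
def Claim_equal_count : Prop := ∀ (s : String), Dom_count s → Spec_count s (count s)

-- ===== LEMMAS AND PROOFS =====

-- the tokenizer's accumulated token list is a prefix: fold from (parts, cur) = parts ++ fold from ([], cur)
theorem pvTok_prefix (l : List Char) (parts : List (List Char × Char)) (cur : List Char) :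
    l.foldl pvStepTok (parts, cur) =
      (parts ++ (l.foldl pvStepTok ([], cur)).1, (l.foldl pvStepTok ([], cur)).2) := by
  induction l generalizing parts cur with
  | nil => simp
  | cons ch l ih =>
    simp only [List.foldl_cons, pvStepTok]
    by_cases h : ch = 'r' ∨ ch = 'g' ∨ ch = 'b'
    · simp only [h, if_pos, List.nil_append]
      rw [ih (parts ++ [(cur, ch)]) [], ih [(cur, ch)] []]
      simp
    · simp only [h, if_neg, not_false_iff]
      exact ih parts (cur ++ [ch])

theorem pvChunkVal_append_digit (cur : List Char) (ch : Char) (h : PySem.Chars.isdigit ch = true) :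
    pvChunkVal (cur ++ [ch]) = pvChunkVal cur * 10 + pvDigitVal ch := by
  simp [pvChunkVal, List.foldl_append, h]

theorem pvChunkVal_append_nondigit (cur : List Char) (ch : Char)
    (h : ¬ PySem.Chars.isdigit ch = true) :
    pvChunkVal (cur ++ [ch]) = pvChunkVal cur := by
  simp [pvChunkVal, List.foldl_append, h]

-- main invariant: A's running n is 10 * (value of B's current chunk)
theorem pvMain (l : List Char) : ∀ (r g b : Int) (cur : List Char),
    (fun st : Int × Int × Int × Int => (st.1, st.2.1, st.2.2.1))
        (l.foldl pvStepA (r, g, b, 10 * pvChunkVal cur)) =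
      ((l.foldl pvStepTok ([], cur)).1).foldl pvStepSum (r, g, b) := by
  induction l with
  | nil => intro r g b cur; simp
  | cons ch l ih =>
    intro r g b cur
    by_cases hr : ch = 'r'
    · subst hr
      rw [List.foldl_cons, List.foldl_cons,
        show pvStepA (r, g, b, 10 * pvChunkVal cur) 'r' = (r + pvChunkVal cur, g, b, 0) from by
          simp [pvStepA, show PySem.Chars.isdigit 'r' = false from by decide],
        show pvStepTok ([], cur) 'r' = ([(cur, 'r')], []) from by simp [pvStepTok],
        pvTok_prefix l [(cur, 'r')] [], List.foldl_append,
        show List.foldl pvStepSum (r, g, b) [(cur, 'r')] = (r + pvChunkVal cur, g, b) from by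
          simp [pvStepSum]]
      have h2 := ih (r + pvChunkVal cur) g b []
      rwa [show (10 : Int) * pvChunkVal [] = 0 from by decide] at h2
    · by_cases hg : ch = 'g'
      · subst hg
        rw [List.foldl_cons, List.foldl_cons,
          show pvStepA (r, g, b, 10 * pvChunkVal cur) 'g' = (r, g + pvChunkVal cur, b, 0) from by
            simp [pvStepA, show PySem.Chars.isdigit 'g' = false from by decide],
          show pvStepTok ([], cur) 'g' = ([(cur, 'g')], []) from by simp [pvStepTok],
          pvTok_prefix l [(cur, 'g')] [], List.foldl_append,
          show List.foldl pvStepSum (r, g, b) [(cur, 'g')] = (r, g + pvChunkVal cur, b) from by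
            simp [pvStepSum]]
        have h2 := ih r (g + pvChunkVal cur) b []
        rwa [show (10 : Int) * pvChunkVal [] = 0 from by decide] at h2
      · by_cases hb : ch = 'b'
        · subst hb
          rw [List.foldl_cons, List.foldl_cons,
            show pvStepA (r, g, b, 10 * pvChunkVal cur) 'b' = (r, g, b + pvChunkVal cur, 0) from by
              simp [pvStepA, show PySem.Chars.isdigit 'b' = false from by decide],
            show pvStepTok ([], cur) 'b' = ([(cur, 'b')], []) from by simp [pvStepTok],
            pvTok_prefix l [(cur, 'b')] [], List.foldl_append,
            show List.foldl pvStepSum (r, g, b) [(cur, 'b')] = (r, g, b + pvChunkVal cur) from by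
              simp [pvStepSum]]
          have h2 := ih r g (b + pvChunkVal cur) []
          rwa [show (10 : Int) * pvChunkVal [] = 0 from by decide] at h2
        · by_cases hd : PySem.Chars.isdigit ch = true
          · rw [List.foldl_cons, List.foldl_cons,
              show pvStepA (r, g, b, 10 * pvChunkVal cur) ch
                  = (r, g, b, (10 * pvChunkVal cur + pvDigitVal ch) * 10) from by
                simp [pvStepA, hd],
              show pvStepTok ([], cur) ch = ([], cur ++ [ch]) from by
                simp [pvStepTok, hr, hg, hb],
              show (10 * pvChunkVal cur + pvDigitVal ch) * 10 = 10 * pvChunkVal (cur ++ [ch]) from by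
                rw [pvChunkVal_append_digit cur ch hd]; ring]
            exact ih r g b (cur ++ [ch])
          · rw [List.foldl_cons, List.foldl_cons,
              show pvStepA (r, g, b, 10 * pvChunkVal cur) ch = (r, g, b, 10 * pvChunkVal cur) from by
                simp [pvStepA, hd, hr, hg, hb],
              show pvStepTok ([], cur) ch = ([], cur ++ [ch]) from by
                simp [pvStepTok, hr, hg, hb],
              ← pvChunkVal_append_nondigit cur ch hd]
            exact ih r g b (cur ++ [ch])

-- ===== VERDICT (by name: the statement is the Claim_ definition above) =====
theorem count_spec : Claim_equal_count := by
  intro s _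
  unfold Spec_count count count_alt
  have := pvMain s.toList 0 0 0 []
  simpa [pvChunkVal] using this
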